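-- pv_equiv track=rewrite | github.com/hao2062/RV1126 | edit.py | dir_block_end_index
-- ===== SOURCE A (Python) =====
-- def dir_block_end_index(lines, b, e, d):
--     # 目录块末尾优先匹配 "/d/*"，否则退化为 "!d/"
--     reignore = "/{}/*".format(d)
--     openln = "!{}/".format(d)
--     last = b
--     for i in range(b + 1, e):
--         if lines[i] == reignore:
--             return i
--     for i in range(b + 1, e):
--         if lines[i] == openln:
--             return i
--     return last
-- ===== SOURCE B (Python) =====
-- def dir_block_end_index(lines, b, e, d):
--     # Single pass: return first reignore match immediately; remember first openln as fallback.
--     reignore = "/{}/*".format(d)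
--     openln = "!{}/".format(d)
--     fallback = None
--     for i in range(b + 1, e):
--         line = lines[i]
--         if line == reignore:
--             return i
--         if fallback is None and line == openln:
--             fallback = i
--     return fallback if fallback is not None else b
-- ===== Notes on version B (the rewrite author's own statement) =====
-- stated objective: alternative
-- what changed: Replaced A's two sequential scans of lines[b+1:e] by a single pass that returns on the first reignore match and remembers the first openln index as a fallback.
import Mathlib
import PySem

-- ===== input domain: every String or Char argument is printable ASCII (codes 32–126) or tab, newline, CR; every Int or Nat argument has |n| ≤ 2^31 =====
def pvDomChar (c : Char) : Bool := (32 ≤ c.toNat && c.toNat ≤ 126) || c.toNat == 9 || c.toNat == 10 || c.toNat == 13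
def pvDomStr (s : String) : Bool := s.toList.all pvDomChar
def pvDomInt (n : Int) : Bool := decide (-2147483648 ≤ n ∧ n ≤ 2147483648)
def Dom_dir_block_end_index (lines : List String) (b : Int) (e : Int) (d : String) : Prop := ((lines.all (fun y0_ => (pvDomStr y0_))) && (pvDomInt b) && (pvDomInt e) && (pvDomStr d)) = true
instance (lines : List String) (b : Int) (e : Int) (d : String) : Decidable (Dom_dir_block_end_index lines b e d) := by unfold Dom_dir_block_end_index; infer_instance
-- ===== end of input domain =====

-- ===== PORT A =====
-- A: two sequential scans over range(b+1, e): first for reignore, then for openln, else b.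
-- lines[i] ported via PySem.List.pyGet?; the none (IndexError) case is excluded by Pre_ and
-- here treated as a mismatch (`getD ""` — targets are never empty, and nothing is claimed there).
def pvAFind (lines : List String) (target : String) : List Int → Option Int
  | [] => none
  | i :: rest =>
    if (PySem.List.pyGet? lines i).getD "" = target then some i
    else pvAFind lines target rest

def dir_block_end_index (lines : List String) (b : Int) (e : Int) (d : String) : Int :=
  let reignore := "/" ++ d ++ "/*"
  let openln := "!" ++ d ++ "/"
  let idxs := PySem.List.pyRange (b + 1) e 1
  match pvAFind lines reignore idxs with
  | some i => i
  | none =>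
    match pvAFind lines openln idxs with
    | some i => i
    | none => b

-- ===== PORT B =====
-- B: one pass; return the first reignore index, remember the first openln index as fallback.
def pvBLoop (lines : List String) (reignore openln : String) (b : Int)
    (fallback : Option Int) : List Int → Int
  | [] => fallback.getD b
  | i :: rest =>
    let line := (PySem.List.pyGet? lines i).getD ""
    if line = reignore then i
    else
      pvBLoop lines reignore openln b
        (if fallback = none ∧ line = openln then some i else fallback) rest

def dir_block_end_index_alt (lines : List String) (b : Int) (e : Int) (d : String) : Int :=
  let reignore := "/" ++ d ++ "/*"
  let openln := "!" ++ d ++ "/"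
  pvBLoop lines reignore openln b none (PySem.List.pyRange (b + 1) e 1)

-- ===== PRECONDITION & SPEC =====
-- Pre_ excludes exactly the inputs on which A raises IndexError: some index in
-- range(b+1, e) outside [-len(lines), len(lines)). B raises there too.
def Pre_dir_block_end_index (lines : List String) (b : Int) (e : Int) (d : String) : Prop :=
  b + 1 < e → (-(lines.length : Int) ≤ b + 1 ∧ e ≤ (lines.length : Int))
instance (lines : List String) (b : Int) (e : Int) (d : String) :
    Decidable (Pre_dir_block_end_index lines b e d) := by
  unfold Pre_dir_block_end_index; infer_instance
def pvWitness_dir_block_end_index : List String × Int × Int × String :=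
  (["a", "!x/", "/x/*"], 0, 3, "x")

def Spec_dir_block_end_index (lines : List String) (b : Int) (e : Int) (d : String) (out : Int) : Prop := out = dir_block_end_index_alt lines b e d
instance (lines : List String) (b : Int) (e : Int) (d : String) (out : Int) : Decidable (Spec_dir_block_end_index lines b e d out) := by unfold Spec_dir_block_end_index; infer_instance

-- ===== CLAIM (what is proved, stated in full; the proofs are below) =====
def Claim_equal_dir_block_end_index : Prop := ∀ (lines : List String) (b : Int) (e : Int) (d : String), Dom_dir_block_end_index lines b e d → Pre_dir_block_end_index lines b e d → Spec_dir_block_end_index lines b e d (dir_block_end_index lines b e d)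

-- ===== LEMMAS AND PROOFS =====

-- With the fallback already set to `some f`, B returns the first reignore index, else f.
theorem pvBLoop_some (lines : List String) (re op : String) (b f : Int) :
    ∀ idxs, pvBLoop lines re op b (some f) idxs =
      (match pvAFind lines re idxs with | some i => i | none => f) := by
  intro idxs
  induction idxs with
  | nil => simp [pvBLoop, pvAFind]
  | cons i rest ih =>
    simp only [pvBLoop, pvAFind]
    by_cases h : (PySem.List.pyGet? lines i).getD "" = re
    · simp [h]
    · simp [h, ih]

-- With no fallback yet, B equals A's two-scan result.
theorem pvBLoop_none (lines : List String) (re op : String) (hne : re ≠ op) (b : Int) :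
    ∀ idxs, pvBLoop lines re op b none idxs =
      (match pvAFind lines re idxs with
       | some i => i
       | none => match pvAFind lines op idxs with | some i => i | none => b) := by
  intro idxs
  induction idxs with
  | nil => simp [pvBLoop, pvAFind]
  | cons i rest ih =>
    simp only [pvBLoop, pvAFind]
    by_cases h : (PySem.List.pyGet? lines i).getD "" = re
    · simp [h]
    · by_cases h2 : (PySem.List.pyGet? lines i).getD "" = op
      · -- fallback becomes some i; on the rest, op no longer matters for the fallback,
        -- but the rest of A's second scan cannot precede index i anyway.
        simp only [h, h2, and_self, if_pos]
        rw [pvBLoop_some lines re op b i rest]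
        cases hfind : pvAFind lines re rest <;> simp [hfind, hne.symm]
      · simp [h, h2, ih]

-- two target strings built by the ports are never equal (different first character)
theorem pv_targets_ne (d : String) : ("/" ++ d ++ "/*" : String) ≠ ("!" ++ d ++ "/" : String) := by
  intro h
  have := congrArg (fun s => s.toList) h
  simp [String.toList_append] at this

-- ===== VERDICT (by name: the statement is the Claim_ definition above) =====
theorem dir_block_end_index_spec : Claim_equal_dir_block_end_index := by
  intro lines b e d _ _
  unfold Spec_dir_block_end_index dir_block_end_index dir_block_end_index_alt
  rw [pvBLoop_none lines _ _ (pv_targets_ne d) b]
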